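-- pv_equiv track=rewrite | github.com/LoftyCloud/My_Java_Project | test5_latexGenerate/src/dataprocess/texProcess.py | tex_split
-- ===== SOURCE A (Python) =====
-- def preprocess_nmt(text):  # 标点符号前后添加空格
--     def no_space(char, near_char):
--         return char in set(',[{^_\']}()|') and near_char != ' ' and near_char != "\n"
--
--     # 在单词和标点符号之间插入空格
--     text = text.replace('\u202f', ' ').replace('\xa0', ' ')
--     out = [' ' + char if i > 0 and no_space(char, text[i - 1]) else char for i, char in enumerate(text)]
--     text = ''.join(out)
--     out = [char + ' ' if (i < len(text)-1) and no_space(char, text[i + 1]) else char for i, char in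
--            enumerate(text)]
--     return ''.join(out)  # 连接成字符串
--
-- def tokenize_nmt(text, num_examples=None):
--     target = []
--     # 按行分割成一个一个列表
--     for i, line in enumerate(text.split('\n')):
--         # 大于样本数量，停止添加
--         if num_examples and i > num_examples:
--             break
--         target.append(line.split(' '))
--     return target
--
-- def tex_split(text):
--     """
--     将tex文件内的内容划分为词元列表
--     :param text:
--     :return:
--     """
--     # 去掉前后两行
--     content = text[2:-2]
--     # 将剩余行连接成一个字符串
--     content = ''.join(content)  # 读取tex文件中的目标部分
--     content = preprocess_nmt(content)  # 标点符号前后添加空格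
--     target = tokenize_nmt(content)  # 按空格划分content
--     split = []
--     for i, line in enumerate(target):  # 将二维列表编码为一维，并对换行进行编码
--         split = split + line
--         if i != len(target) - 1:  # 非最后一行，则用enter代表换行
--             split.append("enter")
--     split = list(filter(lambda x: x != '', split[:-2]))   # 最后会有一个"enter"和" "，将其舍去；去除空字符串
--     return split
-- ===== SOURCE B (Python) =====
-- def tex_split(text):
--     """Single-pass tokenizer: emit tokens directly, never building the spaced string."""
--     content = ''.join(text[2:-2]).replace('\u202f', ' ').replace('\xa0', ' ')
--     punct = set(',[{^_\']}()|')
--     raw = []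
--     cur = ''
--     for ch in content:
--         if ch == '\n':
--             raw.append(cur)
--             raw.append('enter')
--             cur = ''
--         elif ch == ' ':
--             raw.append(cur)
--             cur = ''
--         elif ch in punct:
--             if cur:
--                 raw.append(cur)
--             cur = ch
--         else:
--             if cur and cur[-1] in punct:
--                 raw.append(cur)
--                 cur = ch
--             else:
--                 cur += ch
--     raw.append(cur)
--     return [t for t in raw[:-2] if t]
-- ===== Notes on version B (the rewrite author's own statement) =====
-- stated objective: faster
-- what changed: B replaces A's staged pipeline (two neighbor-aware space-insertion passes building a spaced string, split into a 2-D line/token list, then an index-tracked flatten that re-copies its accumulator per line) by ONE character scan that emits tokens directly into a flat list as it goes: newline emits the current token plus 'enter', space emits it, a punctuation char becomes its own token, everything else extends the current token; the spaced string, the 2-D list and the quadratic flatten all disappear.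
import Mathlib
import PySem

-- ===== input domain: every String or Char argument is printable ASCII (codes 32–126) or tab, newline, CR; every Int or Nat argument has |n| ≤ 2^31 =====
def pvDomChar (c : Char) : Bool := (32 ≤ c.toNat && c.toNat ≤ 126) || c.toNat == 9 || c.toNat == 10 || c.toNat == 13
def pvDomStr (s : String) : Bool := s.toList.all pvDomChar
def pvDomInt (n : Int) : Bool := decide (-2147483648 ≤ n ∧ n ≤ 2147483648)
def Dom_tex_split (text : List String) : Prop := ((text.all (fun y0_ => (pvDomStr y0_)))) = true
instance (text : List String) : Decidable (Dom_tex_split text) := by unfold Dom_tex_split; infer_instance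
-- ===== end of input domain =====

-- B replaces A's staged pipeline (two space-insertion passes, a 2-D line/token list,
-- and a flatten that re-copies its accumulator per line) by ONE character scan that
-- emits tokens directly into a flat list (objective: faster single pass).

-- ===== PORT A =====
-- char in set(',[{^_\']}()|') and near_char != ' ' and near_char != '\n'
def pvNoSpaceA (c near : Char) : Bool :=
  (PySem.Set.ofList ",[{^_']}()|".toList).contains c && near != ' ' && near != '\n'

-- preprocess_nmt: two enumerate-comprehension passes joined by ''
def pvPreprocessA (s : List Char) : List Char :=
  let t := PySem.Chars.replace (PySem.Chars.replace s "\u202F".toList [' ']) "\u00A0".toList [' ']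
  let t1 := PySem.Chars.join []
    ((PySem.List.enumerate t 0).map (fun p =>
      if p.1 > 0 && pvNoSpaceA p.2 (PySem.List.pyGetD t (p.1 - 1) ' ') then [' ', p.2] else [p.2]))
  PySem.Chars.join []
    ((PySem.List.enumerate t1 0).map (fun p =>
      if p.1 < (t1.length : Int) - 1 && pvNoSpaceA p.2 (PySem.List.pyGetD t1 (p.1 + 1) ' ') then [p.2, ' '] else [p.2]))

-- tokenize_nmt's loop with its break test ('if num_examples and i > num_examples')
def pvTokA (ne : Option Int) : List (Int × List Char) → List (List (List Char))
  | [] => []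
  | p :: rest =>
    if (match ne with | some n => !(n == 0) && decide (p.1 > n) | none => false) then []
    else PySem.Chars.splitOn p.2 [' '] :: pvTokA ne rest

def pvTokenizeA (text : List Char) (ne : Option Int) : List (List (List Char)) :=
  pvTokA ne (PySem.List.enumerate (PySem.Chars.splitOn text ['\n']) 0)

def tex_split (text : List String) : List String :=
  let content := PySem.Chars.join [] ((PySem.List.slice text (some 2) (some (-2))).map String.toList)
  let content := pvPreprocessA content
  let target := pvTokenizeA content none
  let split := (PySem.List.enumerate target 0).foldl
    (fun acc p =>
      let acc := acc ++ p.2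
      if p.1 != (target.length : Int) - 1 then acc ++ ["enter".toList] else acc) []
  ((PySem.List.slice split none (some (-2))).filter (fun x => !(x == []))).map String.ofList

-- ===== PORT B =====
def pvPunctB : PySem.Set Char := PySem.Set.ofList ",[{^_']}()|".toList

-- single scan over the content: cur is the token being built, raw tokens are emitted in order
def pvScanB (cur : List Char) : List Char → List (List Char)
  | [] => [cur]
  | c :: r =>
    if c = '\n' then cur :: "enter".toList :: pvScanB [] r
    else if c = ' ' then cur :: pvScanB [] r
    else if pvPunctB.contains c then
      (if cur ≠ [] then [cur] else []) ++ pvScanB [c] r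
    else if (match cur.getLast? with | some l => pvPunctB.contains l | none => false) then
      cur :: pvScanB [c] r
    else pvScanB (cur ++ [c]) r

def tex_split_alt (text : List String) : List String :=
  let content := PySem.Chars.join [] ((PySem.List.slice text (some 2) (some (-2))).map String.toList)
  let content := PySem.Chars.replace (PySem.Chars.replace content "\u202F".toList [' ']) "\u00A0".toList [' ']
  let raw := pvScanB [] content
  ((PySem.List.slice raw none (some (-2))).filter (fun t => !(t == []))).map String.ofList

-- ===== PRECONDITION & SPEC =====
def Spec_tex_split (text : List String) (out : List String) : Prop := out = tex_split_alt text
instance (text : List String) (out : List String) : Decidable (Spec_tex_split text out) := by unfold Spec_tex_split; infer_instance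

-- ===== CLAIM (what is proved, stated in full; the proofs are below) =====
def Claim_equal_tex_split : Prop := ∀ (text : List String), Dom_tex_split text → Spec_tex_split text (tex_split text)

-- ===== LEMMAS AND PROOFS =====

-- A's two preprocess passes, written as direct scans (proof-side reformulations of A)
def pvPass1B : Option Char → List Char → List Char
  | _, [] => []
  | prev, c :: rest =>
    (if (match prev with
         | some p => pvPunctB.contains c && p != ' ' && p != '\n'
         | none => false) then [' ', c] else [c]) ++ pvPass1B (some c) rest

def pvPass2B : List Char → List Char
  | [] => []
  | [c] => [c]
  | c :: d :: rest =>
    (if pvPunctB.contains c && d != ' ' && d != '\n' then [c, ' '] else [c]) ++ pvPass2B (d :: rest)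

-- the combined inserted-separator rule between consecutive original chars c, d
def pvSep (c d : Char) : Bool :=
  (pvPunctB.contains d && c != ' ' && c != '\n') || (pvPunctB.contains c && d != ' ' && d != '\n')

-- the fully spaced string, built in one recursion from the original chars
def pvScP : Option Char → List Char → List Char
  | _, [] => []
  | prev, c :: r =>
    (match prev with
     | some p => if pvSep p c then [' '] else []
     | none => ([] : List Char)) ++ c :: pvScP (some c) r

-- single-char split, functional form: first piece and remaining pieces
def pvSpAux (a : Char) : List Char → List Char × List (List Char)
  | [] => ([], [])
  | c :: r =>
    let q := pvSpAux a r
    if c = a then ([], q.1 :: q.2) else (c :: q.1, q.2)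

def pvSp (a : Char) (v : List Char) : List (List Char) := (pvSpAux a v).1 :: (pvSpAux a v).2

theorem pvGo_char (a : Char) : ∀ (v : List Char) (fuel : Nat) (cur : List Char) (acc : List (List Char)),
    v.length < fuel →
    PySem.Chars.splitOn.go [a] fuel v cur acc
      = acc.reverse ++ (cur.reverse ++ (pvSpAux a v).1) :: (pvSpAux a v).2 := by
  intro v
  induction v with
  | nil =>
    intro fuel cur acc h
    match fuel, h with
    | fuel + 1, _ => simp [PySem.Chars.splitOn.go, pvSpAux]
  | cons c rest ih =>
    intro fuel cur acc h
    match fuel, h with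
    | fuel + 1, h =>
      by_cases hc : c = a
      · subst hc
        have hpre : List.isPrefixOf [c] (c :: rest) = true := by simp [List.isPrefixOf]
        simp only [PySem.Chars.splitOn.go, hpre, if_true]
        rw [show List.drop [c].length (c :: rest) = rest from rfl]
        rw [ih fuel [] (cur.reverse :: acc) (by simpa using Nat.lt_of_succ_lt_succ h)]
        simp [pvSpAux]
      · have hpre : List.isPrefixOf [a] (c :: rest) = false := by
          simp [List.isPrefixOf]; exact fun hh => (hc hh.symm).elim
        simp only [PySem.Chars.splitOn.go, hpre]
        rw [ih fuel (c :: cur) acc (by simpa using Nat.lt_of_succ_lt_succ h)]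
        simp [pvSpAux, hc]

theorem pvSplitOn_single (a : Char) (v : List Char) :
    PySem.Chars.splitOn v [a] = pvSp a v := by
  unfold PySem.Chars.splitOn pvSp
  exact pvGo_char a v (v.length + 1) [] [] (Nat.lt_succ_self _)

-- the 'enter'-interleaved flatten
def pvInter : List (List (List Char)) → List (List Char)
  | [] => []
  | [x] => x
  | x :: y :: rest => x ++ "enter".toList :: pvInter (y :: rest)

theorem pvInter_tok (tok : List Char) (toks : List (List Char)) (rest : List (List (List Char))) :
    pvInter ((tok :: toks) :: rest) = tok :: pvInter (toks :: rest) := by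
  cases rest with
  | nil => simp [pvInter]
  | cons y ys => simp [pvInter]

-- A's flatten loop computes pvInter
theorem pvFoldInter (target : List (List (List Char))) :
    ∀ (v : List (List (List Char))) (k : Nat) (acc : List (List Char)),
    target.drop k = v →
    (PySem.List.enumerate v (k : Int)).foldl
      (fun acc p =>
        if p.1 != (target.length : Int) - 1 then acc ++ p.2 ++ ["enter".toList] else acc ++ p.2) acc
      = acc ++ pvInter v := by
  intro v
  induction v with
  | nil => intro k acc _; simp [PySem.List.enumerate, pvInter]
  | cons x rest ih =>
    intro k acc hk
    have hlen : target.length = k + 1 + rest.length := by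
      have := congrArg List.length hk
      simp [List.length_drop] at this
      omega
    rw [PySem.List.enumerate_cons]
    simp only [List.foldl_cons]
    cases rest with
    | nil =>
      have hcond : ((k : Int) != (target.length : Int) - 1) = false := by
        simp [hlen]
      simp [hcond, PySem.List.enumerate, pvInter]
    | cons y rest' =>
      have hcond : ((k : Int) != (target.length : Int) - 1) = true := by
        simp [hlen]; omega
      have hk' : target.drop (k + 1) = y :: rest' := by
        have := congrArg List.tail hk
        simpa [List.tail_drop] using this
      have := ih (k + 1) (acc ++ x ++ ["enter".toList]) hk'
      simp only [hcond, if_true] at *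
      rw [show ((k : Int) + 1) = ((k + 1 : Nat) : Int) by push_cast; ring, this]
      simp [pvInter]

-- tokenize_nmt with None keeps every line
theorem pvTokA_none (l : List (Int × List Char)) :
    pvTokA none l = l.map (fun p => PySem.Chars.splitOn p.2 [' ']) := by
  induction l with
  | nil => simp [pvTokA]
  | cons p rest ih => simp [pvTokA, ih]

-- previous char of position k
def pvPrevOpt (t : List Char) : Nat → Option Char
  | 0 => none
  | k + 1 => t[k]?

theorem pvJoinNil_cons (x : List Char) (xs : List (List Char)) :
    PySem.Chars.join [] (x :: xs) = x ++ PySem.Chars.join [] xs := by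
  cases xs with
  | nil => simp [PySem.Chars.join, List.intercalate]
  | cons y ys => rw [PySem.Chars.join_cons_cons]; simp

theorem pvPass1 (t : List Char) :
    ∀ (v : List Char) (k : Nat), t.drop k = v →
    PySem.Chars.join []
      ((PySem.List.enumerate v (k : Int)).map (fun p =>
        if p.1 > 0 && pvNoSpaceA p.2 (PySem.List.pyGetD t (p.1 - 1) ' ') then [' ', p.2] else [p.2]))
      = pvPass1B (pvPrevOpt t k) v := by
  intro v
  induction v with
  | nil => intro k _ ; simp [PySem.List.enumerate, PySem.Chars.join, List.intercalate, pvPass1B]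
  | cons c rest ih =>
    intro k hk
    have hkl : k < t.length := by
      have := congrArg List.length hk; simp [List.length_drop] at this; omega
    have htk : t[k]? = some c := by
      have : (t.drop k).head? = some c := by rw [hk]; rfl
      simpa [List.head?_drop] using this
    rw [PySem.List.enumerate_cons, List.map_cons, pvJoinNil_cons]
    have hrest : t.drop (k + 1) = rest := by
      have := congrArg List.tail hk
      simpa [List.tail_drop] using this
    have ihh := ih (k + 1) hrest
    rw [show ((k : Int) + 1) = ((k + 1 : Nat) : Int) by push_cast; ring, ihh]
    have hpo1 : pvPrevOpt t (k + 1) = some c := by simpa [pvPrevOpt] using htk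
    rw [hpo1]
    cases k with
    | zero =>
      simp [pvPass1B, pvPrevOpt, pvNoSpaceA]
    | succ k' =>
      have hk'l : k' < t.length := by omega
      have ht' : t[k']? = some t[k'] := List.getElem?_eq_getElem hk'l
      have hget : PySem.List.pyGetD t ((((k' + 1 : Nat)) : Int) - 1) ' ' = t[k'] := by
        rw [show ((((k' + 1 : Nat)) : Int) - 1) = ((k' : Nat) : Int) by push_cast; ring]
        rw [PySem.List.pyGetD_of_nonneg t ' ' (by positivity)]
        simp [List.getD, ht']
      have hpo2 : pvPrevOpt t (k' + 1) = some t[k'] := by simp [pvPrevOpt, ht']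
      rw [hpo2]
      rw [hget]
      simp [pvPass1B, pvNoSpaceA, pvPunctB]

theorem pvPass2 (t : List Char) :
    ∀ (v : List Char) (k : Nat), t.drop k = v →
    PySem.Chars.join []
      ((PySem.List.enumerate v (k : Int)).map (fun p =>
        if p.1 < (t.length : Int) - 1 && pvNoSpaceA p.2 (PySem.List.pyGetD t (p.1 + 1) ' ') then [p.2, ' '] else [p.2]))
      = pvPass2B v := by
  intro v
  induction v with
  | nil => intro k _; simp [PySem.List.enumerate, PySem.Chars.join, List.intercalate, pvPass2B]
  | cons c rest ih =>
    intro k hk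
    have hlen : t.length = k + 1 + rest.length := by
      have := congrArg List.length hk; simp [List.length_drop] at this; omega
    rw [PySem.List.enumerate_cons, List.map_cons, pvJoinNil_cons]
    have hrest : t.drop (k + 1) = rest := by
      have := congrArg List.tail hk
      simpa [List.tail_drop] using this
    rw [show ((k : Int) + 1) = ((k + 1 : Nat) : Int) by push_cast; ring, ih (k + 1) hrest]
    cases rest with
    | nil =>
      simp only [List.length_nil] at hlen
      have hcond : decide ((k : Int) < (t.length : Int) - 1) = false := by
        rw [decide_eq_false_iff_not, hlen]; push_cast; omega
      simp [hcond, pvPass2B]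
    | cons d rest' =>
      simp only [List.length_cons] at hlen
      have hd : t[k + 1]? = some d := by
        have : (t.drop (k + 1)).head? = some d := by rw [hrest]; rfl
        simpa [List.head?_drop] using this
      have hk1 : k + 1 < t.length := by omega
      have hget : PySem.List.pyGetD t (((k + 1 : Nat)) : Int) ' ' = d := by
        rw [PySem.List.pyGetD_of_nonneg t ' ' (by positivity)]
        have h' := List.getElem?_eq_getElem hk1
        rw [h'] at hd
        simp [List.getD, h']
        exact Option.some.inj hd
      have hcond : decide ((k : Int) < (t.length : Int) - 1) = true := by
        rw [decide_eq_true_iff, hlen]; push_cast; omega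
      rw [hget]
      simp [hcond, pvPass2B, pvNoSpaceA, pvPunctB]

theorem pvPreprocess_eq (s : List Char) :
    pvPreprocessA s
      = pvPass2B (pvPass1B none
          (PySem.Chars.replace (PySem.Chars.replace s "\u202F".toList [' ']) "\u00A0".toList [' '])) := by
  unfold pvPreprocessA
  dsimp only
  have h1 := pvPass1 (PySem.Chars.replace (PySem.Chars.replace s "\u202F".toList [' ']) "\u00A0".toList [' '])
      (PySem.Chars.replace (PySem.Chars.replace s "\u202F".toList [' ']) "\u00A0".toList [' ']) 0 rfl
  simp only [Nat.cast_zero, pvPrevOpt] at h1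
  rw [h1]
  have h2 := pvPass2 (pvPass1B none (PySem.Chars.replace (PySem.Chars.replace s "\u202F".toList [' ']) "\u00A0".toList [' ']))
      (pvPass1B none (PySem.Chars.replace (PySem.Chars.replace s "\u202F".toList [' ']) "\u00A0".toList [' '])) 0 rfl
  simp only [Nat.cast_zero] at h2
  rw [h2]

-- the two passes compose into the one-recursion spaced string
theorem pvComb (r : List Char) : ∀ (c : Char),
    pvPass2B (c :: pvPass1B (some c) r) = c :: pvScP (some c) r := by
  induction r with
  | nil => intro c; simp [pvPass1B, pvPass2B, pvScP]
  | cons d r' ih =>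
    intro c
    have hsp : ¬ (' ' ∈ pvPunctB) := by decide
    by_cases h : ((d ∈ pvPunctB ∧ ¬c = ' ') ∧ ¬c = '\n')
    · have e0 : pvPass1B (some c) (d :: r') = ' ' :: d :: pvPass1B (some d) r' := by
        simp [pvPass1B, h]
      rw [e0]
      have e1 : pvPass2B (c :: ' ' :: d :: pvPass1B (some d) r')
          = c :: pvPass2B (' ' :: d :: pvPass1B (some d) r') := by
        simp [pvPass2B]
      have e2 : pvPass2B (' ' :: d :: pvPass1B (some d) r')
          = ' ' :: pvPass2B (d :: pvPass1B (some d) r') := by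
        simp [pvPass2B, hsp]
      rw [e1, e2, ih d]
      have hsep : pvSep c d = true := by simp [pvSep]; exact Or.inl h
      simp [pvScP, hsep]
    · have e0 : pvPass1B (some c) (d :: r') = d :: pvPass1B (some d) r' := by
        simp [pvPass1B, h]
      rw [e0]
      have e1 : pvPass2B (c :: d :: pvPass1B (some d) r')
          = (if (c ∈ pvPunctB ∧ ¬d = ' ') ∧ ¬d = '\n' then [c, ' '] else [c])
              ++ pvPass2B (d :: pvPass1B (some d) r') := by
        simp [pvPass2B]
      rw [e1, ih d]
      have hsep : (pvSep c d = true) ↔ ((c ∈ pvPunctB ∧ ¬d = ' ') ∧ ¬d = '\n') := by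
        simp [pvSep]; tauto
      by_cases h2 : ((c ∈ pvPunctB ∧ ¬d = ' ') ∧ ¬d = '\n')
      · have : pvSep c d = true := hsep.mpr h2
        simp [pvScP, h2, this]
      · have : pvSep c d = false := by
          rcases Bool.eq_false_or_eq_true (pvSep c d) with ht | hf
          · exact absurd (hsep.mp ht) h2
          · exact hf
        simp [pvScP, h2, this]

theorem pvCombTop (s : List Char) :
    pvPass2B (pvPass1B none s) = pvScP none s := by
  cases s with
  | nil => rfl
  | cons c r =>
    have h1 : pvPass1B none (c :: r) = c :: pvPass1B (some c) r := by simp [pvPass1B]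
    rw [h1, pvComb r c]
    simp [pvScP]

-- raw token list of a spaced string, as one recursion
def pvTokSpec (cur : List Char) : List Char → List (List Char)
  | [] => [cur]
  | c :: w =>
    if c = '\n' then cur :: "enter".toList :: pvTokSpec [] w
    else if c = ' ' then cur :: pvTokSpec [] w
    else pvTokSpec (cur ++ [c]) w

theorem pvF_shape (w : List Char) :
    pvInter ((pvSp '\n' w).map (pvSp ' '))
      = (pvInter ((pvSp '\n' w).map (pvSp ' '))).headI
        :: (pvInter ((pvSp '\n' w).map (pvSp ' '))).tail := by
  have h : pvInter ((pvSp '\n' w).map (pvSp ' '))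
      = (pvSpAux ' ' (pvSpAux '\n' w).1).1
        :: pvInter ((pvSpAux ' ' (pvSpAux '\n' w).1).2 :: ((pvSpAux '\n' w).2).map (pvSp ' ')) := by
    simp only [pvSp, List.map_cons]
    rw [pvInter_tok]
  rw [h]
  simp

theorem pvTokSpec_eq : ∀ (w cur : List Char),
    pvTokSpec cur w
      = (cur ++ (pvInter ((pvSp '\n' w).map (pvSp ' '))).headI)
        :: (pvInter ((pvSp '\n' w).map (pvSp ' '))).tail := by
  intro w
  induction w with
  | nil => intro cur; simp [pvTokSpec, pvSp, pvSpAux, pvInter]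
  | cons c w ih =>
    intro cur
    by_cases hnl : c = '\n'
    · subst hnl
      have hF : pvInter ((pvSp '\n' ('\n' :: w)).map (pvSp ' '))
          = [] :: "enter".toList :: pvInter ((pvSp '\n' w).map (pvSp ' ')) := by
        simp [pvSp, pvSpAux, pvInter]
      have h0 : pvTokSpec cur ('\n' :: w) = cur :: "enter".toList :: pvTokSpec [] w := by
        simp [pvTokSpec]
      have h1 := ih []
      simp only [List.nil_append] at h1
      rw [h0, h1, hF, ← pvF_shape w]
      simp
    · by_cases hsp : c = ' '
      · subst hsp
        have hF : pvInter ((pvSp '\n' (' ' :: w)).map (pvSp ' '))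
            = [] :: pvInter ((pvSp '\n' w).map (pvSp ' ')) := by
          have e1 : pvSpAux '\n' (' ' :: w)
              = (' ' :: (pvSpAux '\n' w).1, (pvSpAux '\n' w).2) := by
            simp [pvSpAux]
          have e2 : pvSpAux ' ' (' ' :: (pvSpAux '\n' w).1)
              = ([], (pvSpAux ' ' (pvSpAux '\n' w).1).1
                  :: (pvSpAux ' ' (pvSpAux '\n' w).1).2) := by
            simp [pvSpAux]
          simp only [pvSp, e1, e2, List.map_cons]
          rw [pvInter_tok, pvInter_tok]
        have h0 : pvTokSpec cur (' ' :: w) = cur :: pvTokSpec [] w := by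
          simp [pvTokSpec]
        have h1 := ih []
        simp only [List.nil_append] at h1
        rw [h0, h1, hF, ← pvF_shape w]
        simp
      · have hF : pvInter ((pvSp '\n' (c :: w)).map (pvSp ' '))
            = (c :: (pvInter ((pvSp '\n' w).map (pvSp ' '))).headI)
              :: (pvInter ((pvSp '\n' w).map (pvSp ' '))).tail := by
          simp only [pvSp, pvSpAux, List.map_cons, if_neg hnl, if_neg hsp]
          rw [pvInter_tok, pvInter_tok]
          rfl
        have h0 : pvTokSpec cur (c :: w) = pvTokSpec (cur ++ [c]) w := by
          simp [pvTokSpec, hnl, hsp]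
        rw [h0, ih (cur ++ [c]), hF]
        simp

theorem pvSep_ws (p c : Char) (hp : p = ' ' ∨ p = '\n') : pvSep p c = false := by
  have h1 : ¬ (' ' ∈ pvPunctB) := by decide
  have h2 : ¬ ('\n' ∈ pvPunctB) := by decide
  rcases hp with h | h <;> subst h <;> simp [pvSep, h1, h2]

theorem pvSep_nlr (p : Char) : pvSep p '\n' = false := by
  have h2 : ¬ ('\n' ∈ pvPunctB) := by decide
  simp [pvSep, h2]

theorem pvSep_spr (p : Char) : pvSep p ' ' = false := by
  have h1 : ¬ (' ' ∈ pvPunctB) := by decide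
  simp [pvSep, h1]

theorem pvScP_ws (p : Char) (hp : p = ' ' ∨ p = '\n') (r : List Char) :
    pvScP (some p) r = pvScP none r := by
  cases r with
  | nil => rfl
  | cons c r' => simp [pvScP, pvSep_ws p c hp]

-- the cons-unfolding of the scan, used to direct the if-chain by hand
theorem pvScanB_cons (cur : List Char) (c : Char) (r : List Char) :
    pvScanB cur (c :: r)
      = (if c = '\n' then cur :: "enter".toList :: pvScanB [] r
         else if c = ' ' then cur :: pvScanB [] r
         else if pvPunctB.contains c then
           (if cur ≠ [] then [cur] else []) ++ pvScanB [c] r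
         else if (match cur.getLast? with | some l => pvPunctB.contains l | none => false) then
           cur :: pvScanB [c] r
         else pvScanB (cur ++ [c]) r) := by
  rfl

theorem pvScan_eq : ∀ (s cur : List Char),
    (cur = [] ∨ ∃ l, cur.getLast? = some l ∧ l ≠ ' ' ∧ l ≠ '\n') →
    pvScanB cur s = pvTokSpec cur (pvScP cur.getLast? s) := by
  intro s
  induction s with
  | nil =>
    intro cur _
    cases h : cur.getLast? <;> simp [pvScanB, pvScP, pvTokSpec]
  | cons c r ih =>
    intro cur hcur
    rw [pvScanB_cons]
    by_cases hnl : c = '\n'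
    · subst hnl
      rw [if_pos rfl]
      have hpre : (match cur.getLast? with
          | some p => if pvSep p '\n' then [' '] else ([] : List Char)
          | none => ([] : List Char)) = ([] : List Char) := by
        cases cur.getLast? with
        | none => rfl
        | some p => simp [pvSep_nlr p]
      have hscp : pvScP cur.getLast? ('\n' :: r) = '\n' :: pvScP none r := by
        simp only [pvScP, hpre, List.nil_append]
        rw [pvScP_ws '\n' (Or.inr rfl) r]
      rw [hscp]
      have h1 : pvTokSpec cur ('\n' :: pvScP none r)
          = cur :: "enter".toList :: pvTokSpec [] (pvScP none r) := by
        simp [pvTokSpec]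
      rw [h1, ih [] (Or.inl rfl)]
      rfl
    · rw [if_neg hnl]
      by_cases hsp : c = ' '
      · subst hsp
        rw [if_pos rfl]
        have hpre : (match cur.getLast? with
            | some p => if pvSep p ' ' then [' '] else ([] : List Char)
            | none => ([] : List Char)) = ([] : List Char) := by
          cases cur.getLast? with
          | none => rfl
          | some p => simp [pvSep_spr p]
        have hscp : pvScP cur.getLast? (' ' :: r) = ' ' :: pvScP none r := by
          simp only [pvScP, hpre, List.nil_append]
          rw [pvScP_ws ' ' (Or.inl rfl) r]
        rw [hscp]
        have h1 : pvTokSpec cur (' ' :: pvScP none r)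
            = cur :: pvTokSpec [] (pvScP none r) := by
          simp [pvTokSpec]
        rw [h1, ih [] (Or.inl rfl)]
        rfl
      · rw [if_neg hsp]
        have hihc : pvScanB [c] r = pvTokSpec [c] (pvScP (some c) r) := by
          have := ih [c] (Or.inr ⟨c, by simp, hsp, hnl⟩)
          simpa using this
        by_cases hp : c ∈ pvPunctB
        · have hpb : pvPunctB.contains c = true := by simpa using hp
          rw [if_pos hpb]
          rcases hcur with hc0 | ⟨l, hl, hl1, hl2⟩
          · subst hc0
            have hscp : pvScP (List.getLast? ([] : List Char)) (c :: r)
                = c :: pvScP (some c) r := by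
              simp [pvScP]
            rw [hscp, if_neg (by simp)]
            have h1 : pvTokSpec [] (c :: pvScP (some c) r)
                = pvTokSpec [c] (pvScP (some c) r) := by
              simp [pvTokSpec, hnl, hsp]
            rw [h1, ← hihc]
            rfl
          · have hcne : cur ≠ [] := by
              intro hh; rw [hh] at hl; simp at hl
            have hsep : pvSep l c = true := by
              simp only [pvSep, Bool.or_eq_true, Bool.and_eq_true, bne_iff_ne, ne_eq]
              exact Or.inl ⟨⟨hpb, hl1⟩, hl2⟩
            have hscp : pvScP cur.getLast? (c :: r)
                = ' ' :: c :: pvScP (some c) r := by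
              simp [pvScP, hl, hsep]
            rw [hscp, if_pos hcne]
            have h1 : pvTokSpec cur (' ' :: c :: pvScP (some c) r)
                = cur :: pvTokSpec [c] (pvScP (some c) r) := by
              simp [pvTokSpec, hnl, hsp]
            rw [h1, ← hihc]
            rfl
        · have hpb : pvPunctB.contains c = false := by
            cases hq : pvPunctB.contains c with
            | false => rfl
            | true => exact absurd (List.mem_of_elem_eq_true (by simpa using hq)) hp
          rw [if_neg (by simp only [Bool.not_eq_true]; exact hpb)]
          rcases hcur with hc0 | ⟨l, hl, hl1, hl2⟩
          · subst hc0
            have hscp : pvScP (List.getLast? ([] : List Char)) (c :: r)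
                = c :: pvScP (some c) r := by
              simp [pvScP]
            have hm : (match List.getLast? ([] : List Char) with
                | some l => pvPunctB.contains l | none => false) = false := by
              rfl
            rw [hscp, if_neg (by simp [hm])]
            have h1 : pvTokSpec [] (c :: pvScP (some c) r)
                = pvTokSpec [c] (pvScP (some c) r) := by
              simp [pvTokSpec, hnl, hsp]
            rw [h1]
            simpa using hihc
          · by_cases hlp : pvPunctB.contains l = true
            · have hsep : pvSep l c = true := by
                simp only [pvSep, Bool.or_eq_true, Bool.and_eq_true, bne_iff_ne, ne_eq]
                exact Or.inr ⟨⟨hlp, hsp⟩, hnl⟩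
              have hscp : pvScP cur.getLast? (c :: r)
                  = ' ' :: c :: pvScP (some c) r := by
                simp [pvScP, hl, hsep]
              have hm : (match cur.getLast? with
                  | some x => pvPunctB.contains x | none => false) = true := by
                rw [hl]; exact hlp
              rw [hscp, if_pos hm]
              have h1 : pvTokSpec cur (' ' :: c :: pvScP (some c) r)
                  = cur :: pvTokSpec [c] (pvScP (some c) r) := by
                simp [pvTokSpec, hnl, hsp]
              rw [h1, ← hihc]
            · have hlpf : pvPunctB.contains l = false := by
                cases hq : pvPunctB.contains l with
                | false => rfl
                | true => exact absurd hq hlp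
              have hsep : pvSep l c = false := by
                simp only [pvSep, hpb, hlpf, Bool.false_and, Bool.and_false,
                  Bool.false_or, Bool.or_false]
              have hscp : pvScP cur.getLast? (c :: r)
                  = c :: pvScP (some c) r := by
                simp [pvScP, hl, hsep]
              have hm : (match cur.getLast? with
                  | some x => pvPunctB.contains x | none => false) = false := by
                rw [hl]; exact hlpf
              rw [hscp, if_neg (by simp only [Bool.not_eq_true]; exact hm)]
              have h1 : pvTokSpec cur (c :: pvScP (some c) r)
                  = pvTokSpec (cur ++ [c]) (pvScP (some c) r) := by
                simp [pvTokSpec, hnl, hsp]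
              have hglast : (cur ++ [c]).getLast? = some c := by simp
              have hih2 := ih (cur ++ [c]) (Or.inr ⟨c, hglast, hsp, hnl⟩)
              rw [hglast] at hih2
              rw [h1, hih2]

-- ===== VERDICT (by name: the statement is the Claim_ definition above) =====
theorem tex_split_spec : Claim_equal_tex_split := by
  intro text _
  unfold Spec_tex_split tex_split tex_split_alt
  dsimp only
  rw [pvPreprocess_eq, pvCombTop]
  set s := PySem.Chars.replace (PySem.Chars.replace
      (PySem.Chars.join [] ((PySem.List.slice text (some 2) (some (-2))).map String.toList))
      "\u202F".toList [' ']) "\u00A0".toList [' '] with hs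
  -- B side: the scan equals the 'enter'-interleaved split of the spaced string
  have hB : pvScanB [] s
      = pvInter ((pvSp '\n' (pvScP none s)).map (pvSp ' ')) := by
    have h1 := pvScan_eq s [] (Or.inl rfl)
    have h2 := pvTokSpec_eq (pvScP none s) []
    simp only [List.getLast?_nil] at h1
    simp only [List.nil_append] at h2
    rw [h1, h2, ← pvF_shape (pvScP none s)]
  rw [hB]
  -- A side: tokenize + flatten equals the same interleave
  unfold pvTokenizeA
  rw [pvTokA_none]
  rw [show ((0 : Int)) = ((0 : Nat) : Int) from rfl]
  have htarget : List.map (fun p => PySem.Chars.splitOn p.2 [' '])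
        (PySem.List.enumerate (PySem.Chars.splitOn (pvScP none s) ['\n']) ((0 : Nat) : Int))
      = (PySem.Chars.splitOn (pvScP none s) ['\n']).map (fun x => PySem.Chars.splitOn x [' ']) := by
    rw [show (fun (p : Int × List Char) => PySem.Chars.splitOn p.2 [' '])
          = ((fun x => PySem.Chars.splitOn x [' ']) ∘ (fun (p : Int × List Char) => p.2)) from rfl,
        ← List.map_map, PySem.List.map_snd_enumerate]
  rw [htarget]
  rw [pvFoldInter ((PySem.Chars.splitOn (pvScP none s) ['\n']).map (fun x => PySem.Chars.splitOn x [' ']))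
      ((PySem.Chars.splitOn (pvScP none s) ['\n']).map (fun x => PySem.Chars.splitOn x [' '])) 0 [] (by simp)]
  rw [pvSplitOn_single '\n' (pvScP none s),
      show (fun x => PySem.Chars.splitOn x [' ']) = pvSp ' '
        from funext fun x => pvSplitOn_single ' ' x]
  simp
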